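-- pv_equiv track=rewrite | github.com/salvable/algorithm-practice | 프로그래머스/LV3/숫자게임.py | solution
-- ===== SOURCE A (Python) =====
-- def solution(A, B):
--
--     if min(A) >= max(B):
--         return 0
--
--     A.sort(reverse=True)
--     B.sort(reverse=True)
--
--     answer = 0
--
--     while True:
--
--         if A[0] >= B[0]:
--             A.pop(0)
--         else:
--             A.pop(0)
--             B.pop(0)
--             answer += 1
--
--         if len(A) == 0 or len(B) == 0:
--             break
--
--     return answer
-- ===== SOURCE B (Python) =====
-- # Same game, different algorithm: sort both descending once, then a single pass over A
-- # with an index pointer j into B instead of repeated pop(0); does not mutate A or B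
-- # (the original sorts and empties them in place); returns j, the number of wins.
-- def solution(A, B):
--     sa = sorted(A, reverse=True)
--     sb = sorted(B, reverse=True)
--     j = 0
--     for a in sa:
--         if j < len(sb) and sb[j] > a:
--             j += 1
--     return j
-- ===== Notes on version B (the rewrite author's own statement) =====
-- stated objective: faster
-- what changed: Replaces the while-loop that repeatedly pops element 0 of both lists (each pop is O(n)) with one sort of each list and a single pass over A using an index pointer into B; also drops the redundant min/max early-return and does not mutate the arguments (return value is unchanged).
import Mathlib
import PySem

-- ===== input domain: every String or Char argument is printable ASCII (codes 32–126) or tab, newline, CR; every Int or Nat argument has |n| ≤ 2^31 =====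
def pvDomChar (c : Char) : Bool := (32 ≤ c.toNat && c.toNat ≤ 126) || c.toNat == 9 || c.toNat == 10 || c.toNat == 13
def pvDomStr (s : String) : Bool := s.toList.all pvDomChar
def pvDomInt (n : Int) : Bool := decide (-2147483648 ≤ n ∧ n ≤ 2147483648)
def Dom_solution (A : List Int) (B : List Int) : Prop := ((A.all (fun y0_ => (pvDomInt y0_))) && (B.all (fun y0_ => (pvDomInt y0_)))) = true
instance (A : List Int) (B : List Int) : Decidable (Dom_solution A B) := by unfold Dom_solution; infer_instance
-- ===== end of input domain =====

-- B replaces the quadratic pop(0) while-loop with one sort and a single index-pointer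
-- pass over A (O(n log n)); return value only: A sorts/pops its arguments in place, B does not.

-- ===== PORT A =====
-- the while-True loop: pop heads, count a win when B's head beats A's head, break when either empties
def solLoop : List Int → List Int → Int → Int
  | a :: as, b :: bs, ans =>
      if a ≥ b then
        (if as = [] ∨ (b :: bs) = [] then ans else solLoop as (b :: bs) ans)
      else
        (if as = [] ∨ bs = [] then ans + 1 else solLoop as bs (ans + 1))
  | _, _, ans => ans

def solution (A : List Int) (B : List Int) : Int :=
  match PySem.List.min? A (fun x => x), PySem.List.max? B (fun x => x) with
  | some mA, some mB =>
      if mA ≥ mB then 0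
      else
        let sa := PySem.List.sorted A (fun x => x) true
        let sb := PySem.List.sorted B (fun x => x) true
        solLoop sa sb 0
  | _, _ => 0   -- unreachable under Pre_: Python raises ValueError on empty A or B

-- ===== PORT B =====
def solution_alt (A : List Int) (B : List Int) : Int :=
  let sa := PySem.List.sorted A (fun x => x) true
  let sb := PySem.List.sorted B (fun x => x) true
  sa.foldl (fun j a =>
    if j < (sb.length : Int) ∧ PySem.List.pyGetD sb j 0 > a then j + 1 else j) 0

-- ===== PRECONDITION & SPEC =====
-- A calls min(A) and max(B): Pre_ excludes the empty lists, on which Python raises ValueError.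
def Pre_solution (A : List Int) (B : List Int) : Prop := A ≠ [] ∧ B ≠ []
instance (A : List Int) (B : List Int) : Decidable (Pre_solution A B) := by unfold Pre_solution; infer_instance
def pvWitness_solution : List Int × List Int := ([3, 1, 5], [2, 6, 4])

def Spec_solution (A : List Int) (B : List Int) (out : Int) : Prop := out = solution_alt A B
instance (A : List Int) (B : List Int) (out : Int) : Decidable (Spec_solution A B out) := by unfold Spec_solution; infer_instance

-- ===== CLAIM (what is proved, stated in full; the proofs are below) =====
def Claim_equal_solution : Prop := ∀ (A : List Int) (B : List Int), Dom_solution A B → Pre_solution A B → Spec_solution A B (solution A B)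

-- ===== LEMMAS AND PROOFS =====

-- the pure count both loops compute: scan l1, consume l2's head exactly when it beats l1's head
def g : List Int → List Int → Int
  | a :: as, b :: bs => if a ≥ b then g as (b :: bs) else g as bs + 1
  | _, _ => 0

theorem solLoop_eq_g : ∀ (l1 l2 : List Int) (ans : Int), solLoop l1 l2 ans = ans + g l1 l2 := by
  intro l1
  induction l1 with
  | nil => intro l2 ans; cases l2 <;> simp [solLoop, g]
  | cons a as ih =>
    intro l2 ans
    cases l2 with
    | nil => simp [solLoop, g]
    | cons b bs =>
      by_cases hab : a ≥ b
      · rcases Decidable.em (as = []) with h | h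
        · subst h; simp [solLoop, g, hab]
        · simp [solLoop, g, hab, h, ih]
      · have hg : g (a :: as) (b :: bs) = g as bs + 1 := by simp [g, hab]
        rcases Decidable.em (as = [] ∨ bs = []) with h | h
        · have h0 : g as bs = 0 := by
            rcases h with h | h
            · subst h; cases bs <;> simp [g]
            · subst h; cases as <;> simp [g]
          simp [solLoop, hab, h, hg, h0]
        · rw [not_or] at h
          simp [solLoop, hab, h.1, h.2, ih, hg]
          ring

theorem g_zero_of_ge : ∀ (l1 l2 : List Int), (∀ a ∈ l1, ∀ b ∈ l2, b ≤ a) → g l1 l2 = 0 := by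
  intro l1
  induction l1 with
  | nil => intro l2 _; cases l2 <;> simp [g]
  | cons a as ih =>
    intro l2 h
    cases l2 with
    | nil => simp [g]
    | cons b bs =>
      have hab : a ≥ b := h a (by simp) b (by simp)
      simp only [g, if_pos hab]
      exact ih (b :: bs) (fun x hx y hy => h x (by simp [hx]) y hy)

theorem fold_eq_g (sb : List Int) :
    ∀ (sa suf pre : List Int), sb = pre ++ suf →
    sa.foldl (fun j a => if j < (sb.length : Int) ∧ PySem.List.pyGetD sb j 0 > a then j + 1 else j)
      (pre.length : Int) = pre.length + g sa suf := by
  intro sa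
  induction sa with
  | nil => intro suf pre _; cases suf <;> simp [g]
  | cons a as ih =>
    intro suf pre hsb
    cases suf with
    | nil =>
      have hlen : ¬ ((pre.length : Int) < (sb.length : Int) ∧ PySem.List.pyGetD sb pre.length 0 > a) := by
        subst hsb; simp
      simp only [List.foldl_cons, if_neg hlen]
      have := ih [] pre hsb
      simpa [g] using this
    | cons b bs =>
      have hget : PySem.List.pyGetD sb (pre.length : Int) 0 = b := by
        subst hsb
        simp [PySem.List.pyGetD_natCast, List.getD]
      have hlt : (pre.length : Int) < (sb.length : Int) := by
        subst hsb; simp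
      by_cases hba : b > a
      · have : ((pre.length : Int) < (sb.length : Int) ∧ PySem.List.pyGetD sb pre.length 0 > a) := ⟨hlt, by rw [hget]; exact hba⟩
        simp only [List.foldl_cons, if_pos this]
        have hsb' : sb = (pre ++ [b]) ++ bs := by simp [hsb]
        have := ih bs (pre ++ [b]) hsb'
        rw [show ((pre.length : Int) + 1) = (((pre ++ [b]).length : Nat) : Int) by simp] at *
        rw [this]
        have hg : g (a :: as) (b :: bs) = g as bs + 1 := by
          simp [g, show ¬ a ≥ b by omega]
        rw [hg]; simp; ring
      · have : ¬ ((pre.length : Int) < (sb.length : Int) ∧ PySem.List.pyGetD sb pre.length 0 > a) := by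
          rw [hget]; omega
        simp only [List.foldl_cons, if_neg this]
        rw [ih (b :: bs) pre hsb]
        have hg : g (a :: as) (b :: bs) = g as (b :: bs) := by
          simp [g, show a ≥ b by omega]
        rw [hg]

theorem alt_eq_g (A B : List Int) :
    solution_alt A B = g (PySem.List.sorted A (fun x => x) true) (PySem.List.sorted B (fun x => x) true) := by
  unfold solution_alt
  have := fold_eq_g (PySem.List.sorted B (fun x => x) true)
    (PySem.List.sorted A (fun x => x) true) (PySem.List.sorted B (fun x => x) true) [] (by simp)
  simpa using this

-- ===== VERDICT (by name: the statement is the Claim_ definition above) =====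
theorem solution_spec : Claim_equal_solution := by
  intro A B _ hpre
  unfold Spec_solution
  obtain ⟨hA, hB⟩ := hpre
  obtain ⟨mA, hmA⟩ : ∃ m, PySem.List.min? A (fun x => x) = some m := by
    cases h : PySem.List.min? A (fun x => x) with
    | none => exact absurd ((PySem.List.min?_eq_none_iff A _).mp h) hA
    | some m => exact ⟨m, rfl⟩
  obtain ⟨mB, hmB⟩ : ∃ m, PySem.List.max? B (fun x => x) = some m := by
    cases h : PySem.List.max? B (fun x => x) with
    | none => exact absurd ((PySem.List.max?_eq_none_iff B _).mp h) hB
    | some m => exact ⟨m, rfl⟩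
  unfold solution
  rw [hmA, hmB]
  rw [alt_eq_g]
  by_cases hge : mA ≥ mB
  · simp only [if_pos hge]
    have h0 : g (PySem.List.sorted A (fun x => x) true) (PySem.List.sorted B (fun x => x) true) = 0 := by
      apply g_zero_of_ge
      intro a ha b hb
      have ha' : a ∈ A := (PySem.List.mem_sorted _ _ _ _).mp ha
      have hb' : b ∈ B := (PySem.List.mem_sorted _ _ _ _).mp hb
      have h1 : mA ≤ a := PySem.List.min?_isMin hmA a ha'
      have h2 : b ≤ mB := PySem.List.max?_isMax hmB b hb'
      omega
    omega
  · simp only [if_neg hge]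
    rw [solLoop_eq_g]
    simp
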